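-- pv_equiv track=rewrite | github.com/MobillsInMobild/Cryptography-Experiments | Finite Field Operations/polynomial.py | isRec
-- ===== SOURCE A (Python) =====
-- def add(a,b):
--     if(a<0):
--         a=add(~a,1)
--     if(b<0):
--         b=add(~b,1)
--     return a^b
--
-- def substract(a,b):
--     return add(a,b)
--
-- def mod(a,b):
--     if(a<0):
--         a=add(~a,1)
--     if(b<0):
--         b=add(~b,1)
--     x=a.bit_length()-b.bit_length()
--     while x>=0:
--         #和division类似，只不过需要求的是剩下来的a
--         temp=b<<x
--         a=substract(a,temp)
--         x=a.bit_length()-b.bit_length()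
--     return a
--
-- def isRec(num,n=8):
--     index=1<<(n//2+1)
--     flag=False
--     for j in range(2,index,2):
--         if mod(num,j)==0:
--             flag=True
--             break
--     return flag
-- ===== SOURCE B (Python) =====
-- def isRec(num, n=8):
--     # In GF(2)[x], every even divisor j is a multiple of x, so some even j in
--     # range(2, 1 << (n//2 + 1), 2) divides num iff the range is nonempty (n >= 2)
--     # and x divides num (num's low bit is 0).
--     return n >= 2 and num % 2 == 0
-- ===== Notes on version B (the rewrite author's own statement) =====
-- stated objective: simpler
-- what changed: Replaces the scan over all even GF(2) trial divisors (each tested with a bitwise polynomial-remainder loop) by the closed form 'n >= 2 and num % 2 == 0', exact because every even polynomial is a multiple of x, so an even divisor exists iff the range is nonempty and x divides num.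
import Mathlib
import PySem

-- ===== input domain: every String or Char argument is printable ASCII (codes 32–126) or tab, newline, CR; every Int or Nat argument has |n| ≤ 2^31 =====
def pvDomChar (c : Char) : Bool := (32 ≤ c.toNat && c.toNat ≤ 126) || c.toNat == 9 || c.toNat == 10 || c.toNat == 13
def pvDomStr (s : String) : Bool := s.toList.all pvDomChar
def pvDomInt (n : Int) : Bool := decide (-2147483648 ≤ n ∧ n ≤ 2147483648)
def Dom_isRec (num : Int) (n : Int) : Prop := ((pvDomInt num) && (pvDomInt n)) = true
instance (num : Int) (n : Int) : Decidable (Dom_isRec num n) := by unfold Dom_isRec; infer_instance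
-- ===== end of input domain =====

-- B replaces A's scan over even GF(2) trial divisors by the closed form
-- "range nonempty (n ≥ 2) and num even", exact because every even polynomial is a multiple of x.

-- ===== PORT A =====
-- value of Python's ~a (cited by pyAdd's/pyMod's termination proofs)
theorem int_not_eq (a : Int) : Int.not a = -a - 1 := by
  cases a <;> simp [Int.not, Int.negSucc_eq]
  omega

-- add(a,b): recursive two's-complement normalisation, then xor (GF(2) addition)
def pyAdd (a : Int) (b : Int) : Int :=
  let a' := if a < 0 then pyAdd (Int.not a) 1 else a
  let b' := if b < 0 then pyAdd (Int.not b) 1 else b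
  PySem.Int.bxor a' b'
termination_by (if a < 0 then 1 else 0) + (if b < 0 then 1 else 0)
decreasing_by
  · simp only [int_not_eq]
    split_ifs <;> omega
  · simp only [int_not_eq]
    split_ifs <;> omega

def pySub (a : Int) (b : Int) : Int := pyAdd a b

-- the while-loop of mod; fuel makes it total (each real iteration strictly decreases
-- a's bit length for the divisors isRec passes, so the fuel pyMod supplies is never exhausted)
def pyModLoop : Nat → Int → Int → Int
  | 0, _, a => a
  | fuel + 1, b, a =>
    let x : Int := (PySem.Int.bitLength a : Int) - (PySem.Int.bitLength b : Int)
    if 0 ≤ x then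
      -- temp = b << x; a = substract(a, temp)
      pyModLoop fuel b (pySub a (b <<< x.toNat))
    else a

def pyMod (a : Int) (b : Int) : Int :=
  let a' := if a < 0 then pyAdd (Int.not a) 1 else a
  let b' := if b < 0 then pyAdd (Int.not b) 1 else b
  pyModLoop (PySem.Int.bitLength a' + 1) b' a'

-- 'for j in range(2, index, 2): if mod(num,j)==0: flag=True; break' with the break as early return
def isRecLoop (num : Int) (index : Int) (j : Int) : Bool :=
  if j < index then
    if pyMod num j = 0 then true
    else isRecLoop num index (j + 2)
  else false
termination_by (index - j).toNat
decreasing_by omega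

def isRec (num : Int) (n : Int) : Bool :=
  -- 1 << (n//2+1); Python raises ValueError when n//2+1 < 0, excluded by Pre_ (the .toNat clamp is outside Pre_)
  let index : Int := (1 : Int) <<< (PySem.Int.floordiv n 2 + 1).toNat
  isRecLoop num index 2

-- ===== PORT B =====
def isRec_alt (num : Int) (n : Int) : Bool :=
  decide (2 ≤ n) && decide (PySem.Int.mod num 2 = 0)

-- ===== PRECONDITION & SPEC =====
-- Pre_ excludes only n ≤ -3, where 1 << (n//2+1) raises ValueError (negative shift count).
def Pre_isRec (num : Int) (n : Int) : Prop := -2 ≤ n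
instance (num : Int) (n : Int) : Decidable (Pre_isRec num n) := by unfold Pre_isRec; infer_instance
def pvWitness_isRec : Int × Int := (6, 8)

def Spec_isRec (num : Int) (n : Int) (out : Bool) : Prop := out = isRec_alt num n
instance (num : Int) (n : Int) (out : Bool) : Decidable (Spec_isRec num n out) := by unfold Spec_isRec; infer_instance

-- ===== CLAIM (what is proved, stated in full; the proofs are below) =====
def Claim_equal_isRec : Prop := ∀ (num : Int) (n : Int), Dom_isRec num n → Pre_isRec num n → Spec_isRec num n (isRec num n)

-- ===== LEMMAS AND PROOFS =====

-- the normalisation mod/add apply to a negative argument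
def convA (a : Int) : Int := if a < 0 then pyAdd (Int.not a) 1 else a

theorem pyAdd_of_nonneg {a b : Int} (ha : 0 ≤ a) (hb : 0 ≤ b) :
    pyAdd a b = PySem.Int.bxor a b := by
  rw [pyAdd]
  simp [Int.not_lt.mpr ha, Int.not_lt.mpr hb]

theorem convA_nonneg (a : Int) : 0 ≤ convA a := by
  unfold convA
  split_ifs with h
  · have h1 : 0 ≤ Int.not a := by rw [int_not_eq]; omega
    rw [pyAdd_of_nonneg h1 (by norm_num), PySem.Int.bxor_of_nonneg h1 (by norm_num)]
    exact Int.natCast_nonneg _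
  · omega

theorem convA_emod (a : Int) : convA a % 2 = a % 2 := by
  unfold convA
  split_ifs with h
  · have h1 : 0 ≤ Int.not a := by rw [int_not_eq]; omega
    rw [pyAdd_of_nonneg h1 (by norm_num), PySem.Int.bxor_of_nonneg h1 (by norm_num)]
    have hx : ((Int.not a).toNat ^^^ (1 : Int).toNat) % 2 = ((Int.not a).toNat + (1 : Int).toNat) % 2 :=
      Nat.xor_mod_two_eq
    have h2 : ((Int.not a).toNat : Int) = -a - 1 := by
      rw [Int.toNat_of_nonneg h1, int_not_eq]
    omega
  · rfl

theorem pyMod_eq (a b : Int) :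
    pyMod a b = pyModLoop (PySem.Int.bitLength (convA a) + 1) (convA b) (convA a) := rfl

-- an even nonnegative divisor preserves the parity and nonnegativity of a through the loop
theorem pyModLoop_parity (b : Int) (hb : 0 ≤ b) (hbe : b % 2 = 0) :
    ∀ (f : Nat) (a : Int), 0 ≤ a →
      0 ≤ pyModLoop f b a ∧ pyModLoop f b a % 2 = a % 2 := by
  intro f
  induction f with
  | zero => exact fun a ha => ⟨ha, rfl⟩
  | succ f ih =>
    intro a ha
    rw [pyModLoop]
    split_ifs with hx
    · have htnn : 0 ≤ b <<< ((PySem.Int.bitLength a : Int) - (PySem.Int.bitLength b : Int)).toNat := by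
        rw [Int.shiftLeft_eq]; positivity
      have hteven : b <<< ((PySem.Int.bitLength a : Int) - (PySem.Int.bitLength b : Int)).toNat % 2 = 0 := by
        rw [Int.shiftLeft_eq]
        have : (2 : Int) ∣ b := by omega
        have : (2 : Int) ∣ b * 2 ^ ((PySem.Int.bitLength a : Int) - (PySem.Int.bitLength b : Int)).toNat :=
          Dvd.dvd.mul_right this _
        omega
      have hsub : pySub a (b <<< ((PySem.Int.bitLength a : Int) - (PySem.Int.bitLength b : Int)).toNat)
          = ((a.toNat ^^^ (b <<< ((PySem.Int.bitLength a : Int) - (PySem.Int.bitLength b : Int)).toNat).toNat : Nat) : Int) := by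
        rw [pySub, pyAdd_of_nonneg ha htnn, PySem.Int.bxor_of_nonneg ha htnn]
      rw [hsub]
      obtain ⟨ihn, ihp⟩ := ih _ (Int.natCast_nonneg _)
      refine ⟨ihn, ?_⟩
      rw [ihp]
      have hxp : (a.toNat ^^^ (b <<< ((PySem.Int.bitLength a : Int) - (PySem.Int.bitLength b : Int)).toNat).toNat) % 2
          = (a.toNat + (b <<< ((PySem.Int.bitLength a : Int) - (PySem.Int.bitLength b : Int)).toNat).toNat) % 2 :=
        Nat.xor_mod_two_eq
      have h1 : (a.toNat : Int) = a := Int.toNat_of_nonneg ha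
      have h2 : ((b <<< ((PySem.Int.bitLength a : Int) - (PySem.Int.bitLength b : Int)).toNat).toNat : Int)
          = b <<< ((PySem.Int.bitLength a : Int) - (PySem.Int.bitLength b : Int)).toNat :=
        Int.toNat_of_nonneg htnn
      omega
    · exact ⟨ha, rfl⟩

-- clearing the joint top bit: (2^k + r) xor 2^k = r
theorem xor_top_bit {k r : Nat} (h : r < 2 ^ k) : (2 ^ k + r) ^^^ 2 ^ k = r := by
  have := Nat.two_pow_add_eq_or_of_lt (i := k) h 1
  rw [Nat.mul_one] at this
  rw [this]
  apply Nat.eq_of_testBit_eq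
  intro i
  simp only [Nat.testBit_xor, Nat.testBit_or, Nat.testBit_two_pow]
  by_cases hik : k = i
  · subst hik
    simp [Nat.testBit_lt_two_pow h]
  · simp [hik]

-- mod(a, 2) computes a's parity (for 0 ≤ a and enough fuel)
theorem pyModLoop_two :
    ∀ (f : Nat) (a : Int), 0 ≤ a → PySem.Int.bitLength a < f → pyModLoop f 2 a = a % 2 := by
  intro f
  induction f with
  | zero => exact fun a _ h => absurd h (Nat.not_lt_zero _)
  | succ f ih =>
    intro a ha hf
    rw [pyModLoop]
    have hb2 : PySem.Int.bitLength 2 = 2 := by decide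
    have hhigh : a.natAbs < 2 ^ PySem.Int.bitLength a := PySem.Int.lt_two_pow_bitLength a
    split_ifs with hx
    · rw [hb2] at hx
      have hL2 : 2 ≤ PySem.Int.bitLength a := by omega
      have hane : a ≠ 0 := by
        intro h0; rw [h0] at hL2; simp [PySem.Int.bitLength_zero] at hL2
      have hlow : 2 ^ (PySem.Int.bitLength a - 1) ≤ a.natAbs := PySem.Int.two_pow_bitLength_le a hane
      have hxv : ((PySem.Int.bitLength a : Int) - (PySem.Int.bitLength 2 : Int)).toNat
          = PySem.Int.bitLength a - 2 := by rw [hb2]; omega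
      have htemp : (2 : Int) <<< (((PySem.Int.bitLength a : Int) - (PySem.Int.bitLength 2 : Int)).toNat)
          = ((2 ^ (PySem.Int.bitLength a - 1) : Nat) : Int) := by
        rw [hxv, Int.shiftLeft_eq]
        push_cast
        rw [show PySem.Int.bitLength a - 1 = (PySem.Int.bitLength a - 2) + 1 from by omega, pow_succ]
        ring
      have hmabs : (a.natAbs : Int) = a := Int.natAbs_of_nonneg ha
      have hmt : a.toNat = a.natAbs := by omega
      -- decompose a's bits: a = 2^(L-1) + r with r < 2^(L-1)
      have hr2 : a.natAbs - 2 ^ (PySem.Int.bitLength a - 1) < 2 ^ (PySem.Int.bitLength a - 1) := by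
        have : 2 ^ PySem.Int.bitLength a = 2 ^ (PySem.Int.bitLength a - 1) * 2 := by
          rw [← pow_succ]; congr 1; omega
        omega
      have hdecomp : a.natAbs = 2 ^ (PySem.Int.bitLength a - 1) + (a.natAbs - 2 ^ (PySem.Int.bitLength a - 1)) := by
        omega
      have hxor : a.toNat ^^^ (2 ^ (PySem.Int.bitLength a - 1)) = a.natAbs - 2 ^ (PySem.Int.bitLength a - 1) := by
        rw [hmt]
        calc a.natAbs ^^^ 2 ^ (PySem.Int.bitLength a - 1)
            = (2 ^ (PySem.Int.bitLength a - 1) + (a.natAbs - 2 ^ (PySem.Int.bitLength a - 1))) ^^^ 2 ^ (PySem.Int.bitLength a - 1) := by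
              rw [← hdecomp]
          _ = a.natAbs - 2 ^ (PySem.Int.bitLength a - 1) := xor_top_bit hr2
      have hsub : pySub a ((2 : Int) <<< (((PySem.Int.bitLength a : Int) - (PySem.Int.bitLength 2 : Int)).toNat))
          = ((a.natAbs - 2 ^ (PySem.Int.bitLength a - 1) : Nat) : Int) := by
        rw [htemp, pySub, pyAdd_of_nonneg ha (Int.natCast_nonneg _),
          PySem.Int.bxor_of_nonneg ha (Int.natCast_nonneg _), Int.toNat_natCast, hxor]
      rw [hsub]
      -- the residue has smaller bit length
      have hblr : PySem.Int.bitLength ((a.natAbs - 2 ^ (PySem.Int.bitLength a - 1) : Nat) : Int) < PySem.Int.bitLength a := by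
        by_cases h0 : ((a.natAbs - 2 ^ (PySem.Int.bitLength a - 1) : Nat) : Int) = 0
        · rw [h0, PySem.Int.bitLength_zero]; omega
        · have hle := PySem.Int.two_pow_bitLength_le _ h0
          rw [Int.natAbs_natCast] at hle
          by_contra hge
          rw [Nat.not_lt] at hge
          have : 2 ^ (PySem.Int.bitLength a - 1) ≤ 2 ^ (PySem.Int.bitLength ((a.natAbs - 2 ^ (PySem.Int.bitLength a - 1) : Nat) : Int) - 1) :=
            Nat.pow_le_pow_right (by norm_num) (by omega)
          omega
      rw [ih _ (Int.natCast_nonneg _) (by omega)]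
      -- parity is unchanged: 2^(L-1) is even
      have heven : 2 ^ (PySem.Int.bitLength a - 1) % 2 = 0 := by
        rw [show PySem.Int.bitLength a - 1 = (PySem.Int.bitLength a - 2) + 1 from by omega, pow_succ]
        omega
      omega
    · -- bit length below 2: a is 0 or 1, and a % 2 = a
      rw [hb2] at hx
      have : 2 ^ PySem.Int.bitLength a ≤ 2 ^ 1 := Nat.pow_le_pow_right (by norm_num) (by omega)
      omega

theorem pyMod_two (num : Int) : pyMod num 2 = num % 2 := by
  rw [pyMod_eq, show convA 2 = 2 from rfl,
    pyModLoop_two _ _ (convA_nonneg num) (Nat.lt_succ_self _), convA_emod]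

theorem pyMod_ne_zero_of_odd (num j : Int) (h2 : 2 ≤ j) (hje : j % 2 = 0)
    (hodd : num % 2 = 1) : pyMod num j ≠ 0 := by
  intro h0
  have hcj : convA j = j := by unfold convA; rw [if_neg (by omega)]
  have := (pyModLoop_parity j (by omega) hje (PySem.Int.bitLength (convA num) + 1)
    (convA num) (convA_nonneg num)).2
  rw [← hcj, ← pyMod_eq, h0, convA_emod] at this
  omega

theorem isRecLoop_odd (num index : Int) (hodd : num % 2 = 1) :
    ∀ j : Int, 2 ≤ j → j % 2 = 0 → isRecLoop num index j = false := by
  suffices H : ∀ (k : Nat) (j : Int), (index - j).toNat = k → 2 ≤ j → j % 2 = 0 →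
      isRecLoop num index j = false from fun j hj he => H _ j rfl hj he
  intro k
  induction k using Nat.strong_induction_on with
  | _ k ih =>
    intro j hk hj he
    rw [isRecLoop]
    split_ifs with h1 h2
    · exact absurd h2 (pyMod_ne_zero_of_odd num j hj he hodd)
    · exact ih ((index - (j + 2)).toNat) (by omega) (j + 2) rfl (by omega) (by omega)
    · rfl

-- ===== VERDICT (by name: the statement is the Claim_ definition above) =====
theorem isRec_spec : Claim_equal_isRec := by
  unfold Claim_equal_isRec
  intro num n _ _
  unfold Spec_isRec isRec isRec_alt
  have hmod : PySem.Int.mod num 2 = num % 2 := PySem.Int.mod_eq_emod_of_pos (by norm_num)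
  by_cases h2 : 2 ≤ n
  · have hfd : 1 ≤ PySem.Int.floordiv n 2 :=
      (PySem.Int.le_floordiv_iff_mul_le (by norm_num)).mpr (by omega)
    have hk2 : 2 ≤ (PySem.Int.floordiv n 2 + 1).toNat := by omega
    have hsh : (1 : Int) <<< (PySem.Int.floordiv n 2 + 1).toNat
        = ((2 ^ (PySem.Int.floordiv n 2 + 1).toNat : Nat) : Int) := by
      rw [Int.shiftLeft_eq, one_mul]
      norm_cast
    have hpow : (2 : Nat) ^ 2 ≤ 2 ^ (PySem.Int.floordiv n 2 + 1).toNat :=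
      Nat.pow_le_pow_right (by norm_num) hk2
    rw [isRecLoop, if_pos (by omega)]
    rcases Int.emod_two_eq num with heven | hodd
    · rw [if_pos (by rw [pyMod_two]; exact heven)]
      simp [heven, h2]
    · rw [if_neg (by rw [pyMod_two, hodd]; norm_num),
        isRecLoop_odd num _ hodd (2 + 2) (by norm_num) (by norm_num)]
      simp [hodd]
  · have hfd : PySem.Int.floordiv n 2 < 1 :=
      (PySem.Int.floordiv_lt_iff_lt_mul (by norm_num)).mpr (by omega)
    have hk1 : (PySem.Int.floordiv n 2 + 1).toNat ≤ 1 := by omega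
    have hsh : (1 : Int) <<< (PySem.Int.floordiv n 2 + 1).toNat
        = ((2 ^ (PySem.Int.floordiv n 2 + 1).toNat : Nat) : Int) := by
      rw [Int.shiftLeft_eq, one_mul]
      norm_cast
    have hpow : (2 : Nat) ^ (PySem.Int.floordiv n 2 + 1).toNat ≤ 2 ^ 1 :=
      Nat.pow_le_pow_right (by norm_num) hk1
    rw [isRecLoop, if_neg (by omega)]
    simp [h2]
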